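-- pv_equiv track=rewrite | github.com/jiayusu/zhihui-rag | utils.py | _get_cover_content
-- ===== SOURCE A (Python) =====
-- def _get_cover_content(text: str, cover_length: int) -> str:
--     """获取文本末尾的覆盖内容"""
--     if len(text) <= cover_length:
--         return text
--
--     # 尝试找到合适的分割点
--     separators = ['\n', '. ', '! ', '? ', '; ', ', ', ' ']
--     for sep in separators:
--         pos = text.rfind(sep, len(text)-cover_length*2, len(text))
--         if pos != -1:
--             return text[pos+len(sep):]
--
--     # 如果找不到分隔符，直接截取
--     return text[-cover_length:]
-- ===== SOURCE B (Python) =====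
-- def _get_cover_content(text: str, cover_length: int) -> str:
--     """获取文本末尾的覆盖内容"""
--     if len(text) <= cover_length:
--         return text
--
--     separators = ['\n', '. ', '! ', '? ', '; ', ', ', ' ']
--     # one pass over the search window (the last cover_length*2 characters),
--     # recording the rightmost start of each separator
--     tail = text[len(text) - cover_length * 2:]
--     last = {}
--     for i in range(len(tail)):
--         for sep in separators:
--             if tail.startswith(sep, i):
--                 last[sep] = i
--
--     for sep in separators:
--         if sep in last:
--             return tail[last[sep] + len(sep):]
--
--     return text[-cover_length:]
-- ===== Notes on version B (the rewrite author's own statement) =====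
-- stated objective: alternative
-- what changed: A runs seven independent rfind scans over the tail window, one per separator; B slices the window off once (tail = text[len(text)-cover_length*2:]) and makes a single forward pass over it recording the rightmost start of each separator in a dict, then returns the suffix by separator priority.
import Mathlib
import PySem

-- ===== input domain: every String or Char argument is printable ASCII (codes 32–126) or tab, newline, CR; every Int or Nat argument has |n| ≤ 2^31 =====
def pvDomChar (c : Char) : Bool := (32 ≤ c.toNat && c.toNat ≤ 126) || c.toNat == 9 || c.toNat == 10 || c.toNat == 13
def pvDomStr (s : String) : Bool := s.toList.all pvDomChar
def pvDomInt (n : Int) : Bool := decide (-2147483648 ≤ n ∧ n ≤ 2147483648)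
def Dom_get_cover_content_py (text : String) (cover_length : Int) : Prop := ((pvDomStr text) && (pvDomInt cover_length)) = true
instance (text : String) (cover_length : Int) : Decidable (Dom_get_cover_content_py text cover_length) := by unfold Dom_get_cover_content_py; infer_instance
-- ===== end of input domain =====

-- B replaces A's seven separate rfind scans by slicing off the search window once and making ONE
-- forward pass over it that records the rightmost occurrence of each separator in a dict,
-- followed by a priority lookup (objective: alternative).

-- ===== PORT A =====
def aSeparators : List String := ["\n", ". ", "! ", "? ", "; ", ", ", " "]

-- the 'for sep in separators' loop with its early return, then the final 'return text[-cover_length:]'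
def aLoop (text : String) (cover_length : Int) : List String → String
  | [] => PySem.Str.slice text (some (-cover_length)) none
  | sep :: rest =>
    let pos := PySem.Str.rfindFrom text sep (PySem.Str.len text - cover_length * 2) (some (PySem.Str.len text))
    if pos ≠ -1 then PySem.Str.slice text (some (pos + PySem.Str.len sep)) none
    else aLoop text cover_length rest

def get_cover_content_py (text : String) (cover_length : Int) : String :=
  if PySem.Str.len text ≤ cover_length then text
  else aLoop text cover_length aSeparators

-- ===== PORT B =====
def bSeparators : List String := ["\n", ". ", "! ", "? ", "; ", ", ", " "]

-- tail.startswith(sep, i) for 0 ≤ i (the only way B calls it: i comes from range(len(tail))):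
-- exact as a prefix test on the drop
def bMatch (tail : String) (sep : String) (i : Int) : Bool :=
  PySem.Chars.startswith (tail.toList.drop i.toNat) sep.toList

-- 'for i in range(len(tail)): for sep in separators: if tail.startswith(sep, i): last[sep] = i'
def bScan (tail : String) : PySem.Dict String Int :=
  (PySem.List.pyRange 0 (PySem.Str.len tail) 1).foldl
    (fun d i => bSeparators.foldl (fun d sep => if bMatch tail sep i then d.insert sep i else d) d)
    PySem.Dict.empty

-- 'for sep in separators: if sep in last: return tail[last[sep]+len(sep):]'
def bFind (tail : String) (d : PySem.Dict String Int) : List String → Option String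
  | [] => none
  | sep :: rest =>
    match d.get? sep with
    | some p => some (PySem.Str.slice tail (some (p + PySem.Str.len sep)) none)
    | none => bFind tail d rest

def get_cover_content_py_alt (text : String) (cover_length : Int) : String :=
  if PySem.Str.len text ≤ cover_length then text
  else
    let tail := PySem.Str.slice text (some (PySem.Str.len text - cover_length * 2)) none
    match bFind tail (bScan tail) bSeparators with
    | some r => r
    | none => PySem.Str.slice text (some (-cover_length)) none

-- ===== PRECONDITION & SPEC =====
def Spec_get_cover_content_py (text : String) (cover_length : Int) (out : String) : Prop := out = get_cover_content_py_alt text cover_length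
instance (text : String) (cover_length : Int) (out : String) : Decidable (Spec_get_cover_content_py text cover_length out) := by unfold Spec_get_cover_content_py; infer_instance

-- ===== CLAIM (what is proved, stated in full; the proofs are below) =====
def Claim_equal_get_cover_content_py : Prop := ∀ (text : String) (cover_length : Int), Dom_get_cover_content_py text cover_length → Spec_get_cover_content_py text cover_length (get_cover_content_py text cover_length)

-- ===== LEMMAS AND PROOFS =====

-- PySem.Chars.rfind.go has no library characterisation; its two unfolding equations:
theorem go_zero (s sub : List Char) : PySem.Chars.rfind.go s sub 0 = if sub.isPrefixOf s then 0 else -1 := rfl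

theorem go_succ (s sub : List Char) (j : Nat) :
    PySem.Chars.rfind.go s sub (j+1) =
      if sub.isPrefixOf (s.drop (j+1)) then ((j:Int)+1) else PySem.Chars.rfind.go s sub j := by
  rw [PySem.Chars.rfind.go]; push_cast; rfl

theorem go_ge (s sub : List Char) (j : Nat) :
    PySem.Chars.rfind.go s sub j = -1 ∨ 0 ≤ PySem.Chars.rfind.go s sub j := by
  induction j with
  | zero => rw [go_zero]; split_ifs <;> simp
  | succ j ih =>
    rw [go_succ]
    split_ifs with h
    · right; positivity
    · exact ih

-- the slice-bound adjustment rfind applies to its start argument (and B's window slice applies too)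
def pvAdj (start : Int) (n : Nat) : Int :=
  if start < 0 then (if start + n < 0 then 0 else start + n) else start

theorem rfindFrom_at_len (s sub : List Char) (start : Int) :
    PySem.Chars.rfindFrom s sub start (some (s.length : Int)) =
      (if (s.length : Int) < pvAdj start s.length then -1
       else if PySem.Chars.rfind (s.drop (pvAdj start s.length).toNat) sub = -1 then -1
       else pvAdj start s.length + PySem.Chars.rfind (s.drop (pvAdj start s.length).toNat) sub) := by
  have h : ¬ ((s.length : Int) < 0) := by omega
  simp only [PySem.Chars.rfindFrom, pvAdj, h, if_false, ite_self, Int.toNat_natCast,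
    List.take_length]

-- the window slice is a drop at the adjusted start
theorem slice_from_eq_drop_adj (l : List Char) (a : Int) :
    PySem.List.slice l (some a) none = l.drop (pvAdj a l.length).toNat := by
  rw [PySem.List.slice_some_none]
  by_cases ha : a < 0
  · obtain ⟨k, hk, rfl⟩ : ∃ k : Nat, 0 < k ∧ a = -(k : Int) :=
      ⟨(-a).toNat, by omega, by omega⟩
    rw [PySem.List.clampIdx_neg_natCast l.length k hk]
    congr 1
    unfold pvAdj
    split_ifs <;> omega
  · obtain ⟨k, rfl⟩ : ∃ k : Nat, a = (k : Int) := ⟨a.toNat, by omega⟩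
    rw [PySem.List.clampIdx_natCast]
    have hadj : (pvAdj (k : Int) l.length).toNat = k := by unfold pvAdj; split_ifs; omega
    rw [hadj]
    rcases le_or_gt k l.length with h | h
    · rw [min_eq_left h]
    · rw [min_eq_right (le_of_lt h), List.drop_length, List.drop_eq_nil_of_le (le_of_lt h)]

-- a nonnegative-start slice of a drop is a slice of the original, shifted
theorem slice_drop_shift (l : List Char) (m : Nat) (k : Int) (hk : 0 ≤ k) :
    PySem.List.slice (l.drop m) (some k) none = PySem.List.slice l (some ((m : Int) + k)) none := by
  rw [PySem.List.slice_from _ hk, PySem.List.slice_from _ (by omega)]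
  rw [List.drop_drop]
  congr 1
  omega

-- the per-separator "rightmost match" accumulator B maintains
def lastStep (s sub : List Char) : Option Int → Int → Option Int :=
  fun acc i => if PySem.Chars.startswith (s.drop i.toNat) sub then some i else acc

theorem sw_eq_isPrefixOf (t sub : List Char) : PySem.Chars.startswith t sub = sub.isPrefixOf t := by
  rw [Bool.eq_iff_iff, PySem.Chars.startswith_iff, List.isPrefixOf_iff_prefix]

-- rfind.go over the window equals B's left-to-right "keep the last match" fold
theorem core (s sub : List Char) (st j : Nat) :
    (PySem.List.pyRange st ((st:Int)+j+1) 1).foldl (lastStep s sub) none =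
      (if PySem.Chars.rfind.go (s.drop st) sub j = -1 then none
       else some ((st:Int) + PySem.Chars.rfind.go (s.drop st) sub j)) := by
  induction j with
  | zero =>
    simp only [Nat.cast_zero, add_zero]
    rw [PySem.List.pyRange_one_singleton, go_zero]
    simp only [List.foldl_cons, List.foldl_nil, lastStep, Int.toNat_natCast,
      sw_eq_isPrefixOf]
    split_ifs <;> simp_all
  | succ j ih =>
    simp only [Nat.cast_add, Nat.cast_one]
    rw [show ((st:Int)+(↑j+1)+1) = ((st:Int)+↑j+1)+1 by ring,
        PySem.List.pyRange_one_succ_right (by omega), List.foldl_append, ih, go_succ]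
    simp only [List.foldl_cons, List.foldl_nil, lastStep]
    have hd : ((st:Int)+j+1).toNat = st + (j+1) := by omega
    rw [hd, show s.drop (st + (j+1)) = (s.drop st).drop (j+1) from by rw [List.drop_drop, Nat.add_comm],
        sw_eq_isPrefixOf]
    rcases go_ge (s.drop st) sub j with h | h <;> split_ifs <;> simp_all <;> omega

theorem rfind_nil (sub : List Char) (hsub : sub ≠ []) : PySem.Chars.rfind [] sub = -1 := by
  show PySem.Chars.rfind.go [] sub 0 = -1
  rw [go_zero]
  simp [List.isPrefixOf_iff_prefix, List.prefix_nil, hsub]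

-- B's full-window fold equals rfind on the window, as an Option
theorem fold0 (s sub : List Char) (hsub : sub ≠ []) :
    (PySem.List.pyRange 0 ((s.length : Int)) 1).foldl (lastStep s sub) none =
      (if PySem.Chars.rfind s sub = -1 then none else some (PySem.Chars.rfind s sub)) := by
  cases hs : s with
  | nil =>
    rw [PySem.List.pyRange_one_eq_nil (by simp)]
    simp [rfind_nil sub hsub]
  | cons c cs =>
    rw [← hs]
    have hlen : s.length = cs.length + 1 := by rw [hs]; rfl
    have hrf : PySem.Chars.rfind s sub = PySem.Chars.rfind.go s sub cs.length := by
      show PySem.Chars.rfind.go s sub s.length = _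
      rw [hlen, go_succ]
      have : s.drop (cs.length + 1) = [] := List.drop_eq_nil_of_le (by omega)
      simp [this, List.isPrefixOf_iff_prefix, List.prefix_nil, hsub]
    have h0 : ((s.length : Nat) : Int) = (0 : Int) + (cs.length : Int) + 1 := by
      rw [hlen]; push_cast; ring
    rw [h0, show (0 : Int) = ((0 : Nat) : Int) from rfl, core s sub 0 cs.length]
    simp only [Nat.cast_zero, List.drop_zero, zero_add, hrf]

-- a conditional-insert pass over a key list: lookup afterwards
theorem get?_foldl_condInsert (L : List String) (d : PySem.Dict String Int) (sep : String)
    (i : Int) (p : String → Bool) :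
    (L.foldl (fun d k => if p k then d.insert k i else d) d).get? sep =
      if sep ∈ L ∧ p sep then some i else d.get? sep := by
  induction L generalizing d with
  | nil => simp
  | cons k L ih =>
    simp only [List.foldl_cons, ih, List.mem_cons]
    by_cases hk : sep = k <;> by_cases hp : p sep <;>
      split_ifs <;> simp_all [PySem.Dict.get?_insert]

-- B's scan, read back per separator, is exactly the rightmost-match fold
theorem get?_bScan (tail : String) (sep : String) (hmem : sep ∈ bSeparators) :
    (bScan tail).get? sep =
      (PySem.List.pyRange 0 (PySem.Str.len tail) 1).foldl (lastStep tail.toList sep.toList) none := by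
  unfold bScan
  rw [show (none : Option Int) = (PySem.Dict.empty : PySem.Dict String Int).get? sep by
    simp [PySem.Dict.get?_empty]]
  generalize (PySem.Dict.empty : PySem.Dict String Int) = d
  induction (PySem.List.pyRange 0 (PySem.Str.len tail) 1) generalizing d with
  | nil => simp
  | cons i L ih =>
    simp only [List.foldl_cons]
    rw [ih]
    congr 1
    rw [get?_foldl_condInsert bSeparators d sep i (fun k => bMatch tail k i)]
    simp only [hmem, true_and, lastStep, bMatch]

-- the two priority loops agree, given per-separator agreement of the produced outputs
theorem loops_eq (text : String) (cover_length : Int) (tail : String)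
    (d : PySem.Dict String Int) (seps : List String)
    (h : ∀ sep ∈ seps,
      (match d.get? sep with
       | some p => some (PySem.Str.slice tail (some (p + PySem.Str.len sep)) none)
       | none => (none : Option String)) =
      (if PySem.Str.rfindFrom text sep (PySem.Str.len text - cover_length * 2)
            (some (PySem.Str.len text)) = -1 then none
       else some (PySem.Str.slice text
            (some (PySem.Str.rfindFrom text sep (PySem.Str.len text - cover_length * 2)
              (some (PySem.Str.len text)) + PySem.Str.len sep)) none))) :
    aLoop text cover_length seps =
      (match bFind tail d seps with
       | some r => r
       | none => PySem.Str.slice text (some (-cover_length)) none) := by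
  induction seps with
  | nil => simp [aLoop, bFind]
  | cons sep rest ih =>
    have hsep := h sep (by simp)
    rw [aLoop, bFind]
    cases hget : d.get? sep with
    | some p =>
      rw [hget] at hsep
      by_cases hpos : PySem.Str.rfindFrom text sep (PySem.Str.len text - cover_length * 2)
          (some (PySem.Str.len text)) = -1
      · rw [hpos] at hsep; simp at hsep
      · rw [if_pos (by simpa using hpos)]
        rw [if_neg hpos] at hsep
        simp only [Option.some.injEq] at hsep
        exact hsep.symm
    | none =>
      rw [hget] at hsep
      by_cases hpos : PySem.Str.rfindFrom text sep (PySem.Str.len text - cover_length * 2)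
          (some (PySem.Str.len text)) = -1
      · rw [if_neg (by simpa using hpos)]
        exact ih (fun s hs => h s (by simp [hs]))
      · rw [if_neg hpos] at hsep; simp at hsep

-- ===== VERDICT (by name: the statement is the Claim_ definition above) =====
theorem get_cover_content_py_spec : Claim_equal_get_cover_content_py := by
  intro text cover_length _
  unfold Spec_get_cover_content_py get_cover_content_py get_cover_content_py_alt
  by_cases hg : PySem.Str.len text ≤ cover_length
  · rw [if_pos hg, if_pos hg]
  · rw [if_neg hg, if_neg hg]
    rw [show bSeparators = aSeparators from rfl]
    set tail := PySem.Str.slice text (some (PySem.Str.len text - cover_length * 2)) none with htail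
    apply loops_eq text cover_length tail (bScan tail) aSeparators
    intro sep hmem
    have hmem' : sep ∈ bSeparators := hmem
    have hne : sep.toList ≠ [] := by fin_cases hmem <;> decide
    -- the window as a drop
    have htl : tail.toList = text.toList.drop
        (pvAdj ((text.length : Int) - cover_length * 2) text.toList.length).toNat := by
      rw [htail]
      simp only [PySem.Str.toList_slice, PySem.Chars.slice_eq_listSlice, PySem.Str.len_eq,
        String.length_toList]
      exact slice_from_eq_drop_adj _ _
    set adj := pvAdj ((text.length : Int) - cover_length * 2) text.toList.length with hadj
    have hadj0 : 0 ≤ adj := by rw [hadj]; unfold pvAdj; split_ifs <;> omega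
    -- B's side: the dict lookup is the Option-ified rfind on the window
    rw [get?_bScan tail sep hmem']
    have hlenT : PySem.Str.len tail = ((tail.toList.length : Nat) : Int) := by
      simp [PySem.Str.len_eq]
    rw [hlenT, fold0 tail.toList sep.toList hne]
    -- A's side: rfindFrom in terms of rfind on the window
    have hA : PySem.Str.rfindFrom text sep ((PySem.Str.len text) - cover_length * 2)
        (some (PySem.Str.len text)) =
        (if (text.toList.length : Int) < adj then -1
         else if PySem.Chars.rfind (text.toList.drop adj.toNat) sep.toList = -1 then -1
         else adj + PySem.Chars.rfind (text.toList.drop adj.toNat) sep.toList) := by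
      simp only [PySem.Str.rfindFrom_eq, PySem.Str.len_eq, String.length_toList]
      exact rfindFrom_at_len text.toList sep.toList _
    rw [hA, ← htl]
    by_cases hlt : (text.toList.length : Int) < adj
    · -- window start past the end: the window is empty, both sides give none
      have : tail.toList = [] := by
        rw [htl]
        exact List.drop_eq_nil_of_le (by omega)
      rw [if_pos hlt]
      simp [this, rfind_nil sep.toList hne]
    · rw [if_neg hlt]
      by_cases hrf : PySem.Chars.rfind tail.toList sep.toList = -1
      · simp [hrf]
      · have hp0 : 0 ≤ PySem.Chars.rfind tail.toList sep.toList := by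
          rcases go_ge tail.toList sep.toList tail.toList.length with h | h
          · exact absurd h hrf
          · exact h
        set p0 := PySem.Chars.rfind tail.toList sep.toList with hp0def
        have hne2 : adj + p0 ≠ -1 := by omega
        rw [if_neg hrf, if_neg hrf, if_neg hne2]
        simp only [Option.some.injEq]
        -- the returned suffixes coincide: a suffix of the window is a suffix of text
        have hsl : 0 ≤ p0 + PySem.Str.len sep := by
          simp only [PySem.Str.len_eq]; omega
        apply String.toList_inj.mp
        simp only [PySem.Str.toList_slice, PySem.Chars.slice_eq_listSlice]
        rw [htl, slice_drop_shift _ _ _ hsl]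
        congr 2
        simp only [PySem.Str.len_eq]
        omega
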